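-- pv_equiv track=rewrite | github.com/Mapet13/Studia | ćwiczenia 6/31.py | f
-- ===== SOURCE A (Python) =====
-- def is_prime(n):
--     if n == 2 or n == 3:
--         return True
--     if n < 2 or n % 2 == 0 or n % 3 == 0:
--         return False
--     i = 5
--     while i*i <= n:
--         if n % i == 0 or n % (i + 2) == 0:
--             return False
--         i += 6
--     return True
--
-- def get_sum_of_all_products(T, N, p = 0, i = 0):
--     if i == N:
--         return p
--     r = p * T[i]
--     if p == 0:
--         r = T[i]
--     return get_sum_of_all_products(T, N, p, i+1) + get_sum_of_all_products(T, N, r, i+1)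
--
-- def f(x):
--     T = [0] * 20
--     i = 0
--
--     p = 2
--     while x > 1:
--         if not is_prime(p) or x % p != 0:
--             p += 1
--             if T[i] != 0:
--                 i += 1
--         else:
--             x //= p
--             T[i] = p
--
--     if T[i] != 0:
--         i += 1
--
--     return get_sum_of_all_products(T, i)
-- ===== SOURCE B (Python) =====
-- def f(x):
--     # the sum of products over all nonempty subsets of the distinct prime factors
--     # factorises into a closed form; the factors are found by one trial-division
--     # pass up to the square root
--     result = 1
--     d = 2
--     while d * d <= x:
--         if x % d == 0:
--             while x % d == 0:
--                 x //= d
--             result *= 1 + d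
--         d += 1
--     if x > 1:
--         result *= 1 + x
--     return result - 1
-- ===== Notes on version B (the rewrite author's own statement) =====
-- stated objective: faster
-- what changed: A collects the distinct prime factors by trial-dividing with a unit-step counter filtered through a wheel primality test and then sums the products of all subsets of them by exponential recursion into a fixed scratch array; B does a single trial-division pass up to the square root and multiplies out the closed-form factorisation of the subset-product sum, so no primality test, no subset recursion and no scratch array.
import Mathlib
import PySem

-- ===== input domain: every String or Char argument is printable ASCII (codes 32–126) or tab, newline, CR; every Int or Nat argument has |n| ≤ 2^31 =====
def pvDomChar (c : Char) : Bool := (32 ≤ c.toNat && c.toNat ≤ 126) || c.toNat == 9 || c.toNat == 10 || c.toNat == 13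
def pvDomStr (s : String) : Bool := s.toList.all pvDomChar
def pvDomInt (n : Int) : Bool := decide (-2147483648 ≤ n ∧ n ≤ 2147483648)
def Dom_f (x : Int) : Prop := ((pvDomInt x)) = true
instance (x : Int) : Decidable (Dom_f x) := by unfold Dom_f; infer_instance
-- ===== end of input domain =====

-- B changes the algorithm: one trial-division pass up to the square root and the closed-form
-- factorisation of the subset-product sum replace A's unit-step search filtered by a
-- primality test plus an exponential subset recursion over a scratch array.

-- ===== PORT A =====
-- the wheel trial loop of is_prime; fuel ≥ the number of iterations on every reachable call
def isPrimeLoop (fuel : Nat) (n i : Int) : Bool :=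
  match fuel with
  | 0 => true
  | fuel + 1 =>
    if i * i ≤ n then
      if PySem.Int.mod n i = 0 ∨ PySem.Int.mod n (i + 2) = 0 then false
      else isPrimeLoop fuel n (i + 6)
    else true

def is_prime (n : Int) : Bool :=
  if n = 2 ∨ n = 3 then true
  else if n < 2 ∨ PySem.Int.mod n 2 = 0 ∨ PySem.Int.mod n 3 = 0 then false
  else isPrimeLoop n.toNat n 5

-- get_sum_of_all_products; fuel = (N - i) suffices (at fuel 0 only the i = N base case remains)
def gsop (fuel : Nat) (T : List Int) (N p i : Int) : Int :=
  match fuel with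
  | 0 => p
  | fuel + 1 =>
    if i = N then p
    else
      let r := p * PySem.List.pyGetD T i 0   -- T[i]: i is in range on every reachable call
      let r := if p = 0 then PySem.List.pyGetD T i 0 else r
      gsop fuel T N p (i + 1) + gsop fuel T N r (i + 1)

-- the while-loop of f over state (x, p, i, T); fuel bounds the iteration count
def loopA (fuel : Nat) (x p i : Int) (T : List Int) : List Int × Int :=
  match fuel with
  | 0 => (T, i)
  | fuel + 1 =>
    if 1 < x then
      if is_prime p = false ∨ PySem.Int.mod x p ≠ 0 then
        if PySem.List.pyGetD T i 0 ≠ 0 then loopA fuel x (p + 1) (i + 1) T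
        else loopA fuel x (p + 1) i T
      else loopA fuel (PySem.Int.floordiv x p) p i (PySem.List.pySetD T i p)
    else (T, i)

def f (x : Int) : Int :=
  let T0 : List Int := List.replicate 20 0
  let s := loopA (2 * x.toNat + 2) x 2 0 T0
  let T := s.1
  let i := if PySem.List.pyGetD T s.2 0 ≠ 0 then s.2 + 1 else s.2
  gsop i.toNat T i 0 0

-- ===== PORT B =====
-- inner while: divide out all factors d; fuel ≥ log₂ x suffices
def stripB (fuel : Nat) (x d : Int) : Int :=
  match fuel with
  | 0 => x
  | fuel + 1 =>
    if PySem.Int.mod x d = 0 then stripB fuel (PySem.Int.floordiv x d) d else x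

-- outer while d*d ≤ x of B
def loopB (fuel : Nat) (x d r : Int) : Int × Int :=
  match fuel with
  | 0 => (x, r)
  | fuel + 1 =>
    if d * d ≤ x then
      if PySem.Int.mod x d = 0 then loopB fuel (stripB x.toNat x d) (d + 1) (r * (1 + d))
      else loopB fuel x (d + 1) r
    else (x, r)

def f_alt (x : Int) : Int :=
  let s := loopB (x.toNat + 2) x 2 1
  let r := if 1 < s.1 then s.2 * (1 + s.1) else s.2
  r - 1

-- ===== PRECONDITION & SPEC =====
def Spec_f (x : Int) (out : Int) : Prop := out = f_alt x
instance (x : Int) (out : Int) : Decidable (Spec_f x out) := by unfold Spec_f; infer_instance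

-- ===== CLAIM (what is proved, stated in full; the proofs are below) =====
def Claim_equal_f : Prop := ∀ (x : Int), Dom_f x → Spec_f x (f x)

-- ===== LEMMAS AND PROOFS =====

-- product of (1+q) over the distinct prime factors q ≥ d of n: the common value both loops compute
def Dspec (n d : ℕ) : ℤ := ∏ q ∈ n.primeFactors.filter (fun q => d ≤ q), (1 + (q : ℤ))

-- ∏_{j ∈ [a, b)} (1 + T[j]) — the value gsop produces
def PPfrom (T : List Int) (a b : ℕ) : ℤ :=
  if a < b then (1 + T.getD a 0) * PPfrom T (a + 1) b else 1
termination_by b - a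

-- plain product ∏_{j ∈ [a, b)} T[j] — used only to bound the write index of A's array
def QQfrom (T : List Int) (a b : ℕ) : ℤ :=
  if a < b then T.getD a 0 * QQfrom T (a + 1) b else 1
termination_by b - a


def asc : ℕ → ℤ
  | 0 => 1
  | k + 1 => asc k * ((k : ℤ) + 2)

-- the post-loop tail of f: the conditional bump of i followed by the subset recursion
def postA (s : List Int × Int) : Int :=
  let i := if PySem.List.pyGetD s.1 s.2 0 ≠ 0 then s.2 + 1 else s.2
  gsop i.toNat s.1 i 0 0

lemma Dspec_one (d : ℕ) : Dspec 1 d = 1 := by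
  simp [Dspec]

lemma Dspec_succ_of_not (n d : ℕ) (h : ¬(Nat.Prime d ∧ d ∣ n)) : Dspec n d = Dspec n (d + 1) := by
  unfold Dspec
  congr 1
  ext q
  simp only [Finset.mem_filter, Nat.mem_primeFactors]
  constructor
  · rintro ⟨⟨hq, hqn, hn0⟩, hd⟩
    rcases eq_or_lt_of_le hd with rfl | hlt
    · exact absurd ⟨hq, hqn⟩ h
    · exact ⟨⟨hq, hqn, hn0⟩, by omega⟩
  · rintro ⟨h1, hd⟩; exact ⟨h1, by omega⟩

lemma Dspec_div (n d : ℕ) (hd : Nat.Prime d) (hdvd : d ∣ n) (hn : n ≠ 0) :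
    Dspec (n / d) (d + 1) = Dspec n (d + 1) := by
  unfold Dspec
  congr 1
  ext q
  simp only [Finset.mem_filter, Nat.mem_primeFactors]
  constructor
  · rintro ⟨⟨hq, hqn, _⟩, hge⟩
    exact ⟨⟨hq, hqn.trans (Nat.div_dvd_of_dvd hdvd), hn⟩, hge⟩
  · rintro ⟨⟨hq, hqn, _⟩, hge⟩
    refine ⟨⟨hq, ?_, ?_⟩, hge⟩
    · have hne : q ≠ d := by omega
      have hcop : Nat.Coprime q d := (Nat.coprime_primes hq hd).mpr hne
      have : q ∣ (n / d) * d := by rwa [Nat.div_mul_cancel hdvd]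
      exact hcop.dvd_of_dvd_mul_right this
    · have hdle := Nat.le_of_dvd (Nat.pos_of_ne_zero hn) hdvd
      have := Nat.div_pos hdle hd.pos
      omega

lemma Dspec_split (n d : ℕ) (hd : Nat.Prime d) (hdvd : d ∣ n) (hn : n ≠ 0) :
    Dspec n d = (1 + (d : ℤ)) * Dspec n (d + 1) := by
  unfold Dspec
  have hins : n.primeFactors.filter (fun q => d ≤ q)
      = insert d (n.primeFactors.filter (fun q => d + 1 ≤ q)) := by
    ext q
    simp only [Finset.mem_filter, Finset.mem_insert, Nat.mem_primeFactors]
    constructor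
    · rintro ⟨⟨hq, hqn, hn0⟩, hge⟩
      rcases eq_or_lt_of_le hge with rfl | hlt
      · exact Or.inl rfl
      · exact Or.inr ⟨⟨hq, hqn, hn0⟩, by omega⟩
    · rintro (rfl | ⟨h1, hge⟩)
      · exact ⟨⟨hd, hdvd, hn⟩, le_refl _⟩
      · exact ⟨h1, by omega⟩
  rw [hins, Finset.prod_insert (by simp)]

lemma Dspec_prime_tail (n d : ℕ) (h2 : 2 ≤ n)
    (hmin : ∀ q, Nat.Prime q → q ∣ n → d ≤ q) (hlt : n < d * d) : Dspec n d = 1 + (n : ℤ) := by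
  have hp : Nat.Prime n := by
    by_contra hnp
    have h1 := Nat.minFac_prime (show n ≠ 1 by omega)
    have h2' := Nat.minFac_dvd n
    have h3 := hmin _ h1 h2'
    have h4 := Nat.minFac_sq_le_self (by omega) hnp
    have : d * d ≤ n.minFac * n.minFac := Nat.mul_le_mul h3 h3
    nlinarith [h4, sq (n.minFac)]
  unfold Dspec
  rw [hp.primeFactors]
  rw [Finset.filter_singleton, if_pos (hmin n hp dvd_rfl)]
  simp

lemma prime_of_min (n p : ℕ) (hp : 2 ≤ p) (hd : p ∣ n) (hn : 2 ≤ n)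
    (hmin : ∀ q, Nat.Prime q → q ∣ n → p ≤ q) : Nat.Prime p := by
  obtain ⟨q, hq, hqp⟩ := Nat.exists_prime_and_dvd (show p ≠ 1 by omega)
  have h1 := hmin q hq (hqp.trans hd)
  have h2 := Nat.le_of_dvd (by omega) hqp
  have : q = p := by omega
  rwa [this] at hq

lemma min_le_self (n m : ℕ) (h2 : 2 ≤ n) (hmin : ∀ q, Nat.Prime q → q ∣ n → m ≤ q) : m ≤ n := by
  have h1 := Nat.minFac_prime (show n ≠ 1 by omega)
  have := hmin _ h1 (Nat.minFac_dvd n)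
  have := Nat.minFac_le (show 0 < n by omega)
  omega

lemma isPrimeLoop_of_prime (m : ℕ) (hm : Nat.Prime m) :
    ∀ (fuel : ℕ) (i : ℤ), 5 ≤ i → isPrimeLoop fuel (↑m) i = true := by
  intro fuel
  induction fuel with
  | zero => intro i hi; rfl
  | succ fuel ih =>
    intro i hi
    rw [isPrimeLoop]
    split
    case isTrue h =>
      have key : ∀ k : ℤ, 5 ≤ k → (k - 2) * (k - 2) ≤ (m : ℤ) → PySem.Int.mod (↑m) k ≠ 0 := by
        intro k hk hkk hmod
        have hdvd : k ∣ (m : ℤ) := (PySem.Int.mod_eq_zero_iff_dvd _ _).mp hmod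
        have hk0 : (0:ℤ) ≤ k := by omega
        lift k to ℕ using hk0 with k'
        have : k' ∣ m := by exact_mod_cast hdvd
        rcases (Nat.Prime.eq_one_or_self_of_dvd hm k' this) with h1 | h2
        · omega
        · subst h2
          have h5 : (5:ℤ) ≤ (k':ℤ) := hk
          nlinarith
      have h1 : PySem.Int.mod (↑m) i ≠ 0 := key i hi (by nlinarith)
      have h2 : PySem.Int.mod (↑m) (i + 2) ≠ 0 := key (i + 2) (by omega) (by nlinarith)
      rw [if_neg (by tauto)]
      exact ih (i + 6) (by omega)
    case isFalse h => rfl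

lemma is_prime_complete (m : ℕ) (hm : Nat.Prime m) : is_prime (↑m) = true := by
  unfold is_prime
  by_cases h23 : (m : ℤ) = 2 ∨ (m : ℤ) = 3
  · rw [if_pos h23]
  · rw [if_neg h23]
    have hm2 := hm.two_le
    have hne2 : m ≠ 2 := by intro h; exact h23 (Or.inl (by exact_mod_cast h))
    have hne3 : m ≠ 3 := by intro h; exact h23 (Or.inr (by exact_mod_cast h))
    have hm5 : 5 ≤ m := by
      rcases Nat.lt_or_ge m 5 with h | h
      · interval_cases m <;> first | omega | (exfalso; revert hm; decide)
      · exact h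
    have hnd2 : ¬ (2 ∣ m) := by
      intro hd
      rcases hm.eq_one_or_self_of_dvd 2 hd with h | h <;> omega
    have hnd3 : ¬ (3 ∣ m) := by
      intro hd
      rcases hm.eq_one_or_self_of_dvd 3 hd with h | h <;> omega
    rw [if_neg]
    · have : ((m:ℤ)).toNat = m := Int.toNat_natCast m
      rw [this]
      exact isPrimeLoop_of_prime m hm _ 5 (by omega)
    · push_neg
      refine ⟨by exact_mod_cast hm2, ?_, ?_⟩
      · intro hmod
        exact hnd2 (by exact_mod_cast (PySem.Int.mod_eq_zero_iff_dvd _ _).mp hmod)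
      · intro hmod
        exact hnd3 (by exact_mod_cast (PySem.Int.mod_eq_zero_iff_dvd _ _).mp hmod)

lemma PPfrom_stop (T : List Int) (a b : ℕ) (h : b ≤ a) : PPfrom T a b = 1 := by
  rw [PPfrom, if_neg (by omega)]

lemma QQfrom_stop (T : List Int) (a b : ℕ) (h : b ≤ a) : QQfrom T a b = 1 := by
  rw [QQfrom, if_neg (by omega)]

lemma PPfrom_step (T : List Int) (a b : ℕ) (h : a < b) :
    PPfrom T a b = (1 + T.getD a 0) * PPfrom T (a + 1) b := by
  rw [PPfrom, if_pos h]

lemma QQfrom_step (T : List Int) (a b : ℕ) (h : a < b) :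
    QQfrom T a b = T.getD a 0 * QQfrom T (a + 1) b := by
  rw [QQfrom, if_pos h]

lemma PPfrom_succ_right (T : List Int) (a b : ℕ) (h : a ≤ b) :
    PPfrom T a (b + 1) = PPfrom T a b * (1 + T.getD b 0) := by
  obtain ⟨k, rfl⟩ : ∃ k, b = a + k := ⟨b - a, by omega⟩
  clear h
  induction k generalizing a with
  | zero =>
    rw [PPfrom_step T a _ (by omega), PPfrom_stop T (a+1) _ (by omega),
      PPfrom_stop T a _ (by omega)]
    simp
  | succ k ih =>
    rw [PPfrom_step T a _ (by omega), PPfrom_step T a (a + (k+1)) (by omega)]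
    rw [show a + (k + 1) + 1 = (a + 1) + k + 1 by omega, show a + (k+1) = (a+1) + k by omega]
    rw [ih (a + 1)]
    ring

lemma QQfrom_succ_right (T : List Int) (a b : ℕ) (h : a ≤ b) :
    QQfrom T a (b + 1) = QQfrom T a b * T.getD b 0 := by
  obtain ⟨k, rfl⟩ : ∃ k, b = a + k := ⟨b - a, by omega⟩
  clear h
  induction k generalizing a with
  | zero =>
    rw [QQfrom_step T a _ (by omega), QQfrom_stop T (a+1) _ (by omega),
      QQfrom_stop T a _ (by omega)]
    simp
  | succ k ih =>
    rw [QQfrom_step T a _ (by omega), QQfrom_step T a (a + (k+1)) (by omega)]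
    rw [show a + (k + 1) + 1 = (a + 1) + k + 1 by omega, show a + (k+1) = (a+1) + k by omega]
    rw [ih (a + 1)]
    ring

lemma PPfrom_congr (T T' : List Int) (a b : ℕ)
    (h : ∀ k, a ≤ k → k < b → T.getD k 0 = T'.getD k 0) : PPfrom T a b = PPfrom T' a b := by
  rcases Nat.lt_or_ge b a with hba | hba
  · rw [PPfrom_stop T a b (by omega), PPfrom_stop T' a b (by omega)]
  obtain ⟨k, rfl⟩ : ∃ k, b = a + k := ⟨b - a, by omega⟩
  induction k generalizing a with
  | zero => rw [PPfrom_stop T a _ (by omega), PPfrom_stop T' a _ (by omega)]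
  | succ k ih =>
    rw [PPfrom_step T a _ (by omega), PPfrom_step T' a _ (by omega)]
    rw [h a (by omega) (by omega), show a + (k+1) = (a+1) + k by omega]
    rw [ih (a + 1) (fun j hj1 hj2 => h j (by omega) (by omega)) (by omega)]

lemma QQfrom_congr (T T' : List Int) (a b : ℕ)
    (h : ∀ k, a ≤ k → k < b → T.getD k 0 = T'.getD k 0) : QQfrom T a b = QQfrom T' a b := by
  rcases Nat.lt_or_ge b a with hba | hba
  · rw [QQfrom_stop T a b (by omega), QQfrom_stop T' a b (by omega)]
  obtain ⟨k, rfl⟩ : ∃ k, b = a + k := ⟨b - a, by omega⟩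
  induction k generalizing a with
  | zero => rw [QQfrom_stop T a _ (by omega), QQfrom_stop T' a _ (by omega)]
  | succ k ih =>
    rw [QQfrom_step T a _ (by omega), QQfrom_step T' a _ (by omega)]
    rw [h a (by omega) (by omega), show a + (k+1) = (a+1) + k by omega]
    rw [ih (a + 1) (fun j hj1 hj2 => h j (by omega) (by omega)) (by omega)]

lemma asc_pos (k : ℕ) : 1 ≤ asc k := by
  induction k with
  | zero => rfl
  | succ k ih => rw [asc]; nlinarith

lemma asc_mono (k l : ℕ) (h : k ≤ l) : asc k ≤ asc l := by
  induction l with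
  | zero => have : k = 0 := by omega
            subst this; rfl
  | succ l ih =>
    rcases Nat.lt_or_ge k (l + 1) with h' | h'
    · have h1 := ih (by omega)
      rw [asc]
      nlinarith [asc_pos l]
    · have : k = l + 1 := by omega
      subst this; rfl

lemma QQfrom_ge_asc (T : List Int) (b : ℕ)
    (h : ∀ k, k < b → (k : ℤ) + 2 ≤ T.getD k 0) : asc b ≤ QQfrom T 0 b := by
  induction b with
  | zero => rw [QQfrom_stop T 0 0 (by omega)]; rfl
  | succ b ih =>
    rw [QQfrom_succ_right T 0 b (by omega), asc]
    have h1 := ih (fun k hk => h k (by omega))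
    have h2 := h b (by omega)
    nlinarith [asc_pos b]

lemma entries_ge (T : List Int) (j : ℕ)
    (hmono : ∀ k, k + 1 < j → T.getD k 0 < T.getD (k + 1) 0)
    (hge2 : ∀ k, k < j → 2 ≤ T.getD k 0) :
    ∀ k, k < j → (k : ℤ) + 2 ≤ T.getD k 0 := by
  intro k
  induction k with
  | zero => intro hk; simpa using hge2 0 hk
  | succ k ih =>
    intro hk
    have h1 := ih (by omega)
    have h2 := hmono k (by omega)
    push_cast
    omega

lemma index_bound (T : List Int) (j : ℕ) (n : ℕ) (hn : 1 ≤ n)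
    (hmono : ∀ k, k + 1 < j → T.getD k 0 < T.getD (k + 1) 0)
    (hge2 : ∀ k, k < j → 2 ≤ T.getD k 0)
    (hb : QQfrom T 0 j * (n : ℤ) ≤ 2 ^ 31) : j < 12 := by
  by_contra hj
  push_neg at hj
  have h1 := QQfrom_ge_asc T j (entries_ge T j hmono hge2)
  have h2 := asc_mono 12 j hj
  have h3 : asc 12 = 6227020800 := by norm_num [asc]
  have hn' : (1:ℤ) ≤ (n:ℤ) := by exact_mod_cast hn
  nlinarith

lemma gsop_nonzero (T : List Int) (N : ℕ) :
    ∀ (fuel : ℕ) (p : ℤ) (j : ℕ), N - j ≤ fuel → j ≤ N → p ≠ 0 →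
    (∀ k, j ≤ k → k < N → 0 < T.getD k 0) →
    gsop fuel T (↑N) p (↑j) = p * PPfrom T j N := by
  intro fuel
  induction fuel with
  | zero =>
    intro p j hfuel hj hp hpos
    have hjN : j = N := by omega
    subst hjN
    rw [gsop, PPfrom_stop T _ _ (le_refl _)]
    ring
  | succ fuel ih =>
    intro p j hfuel hj hp hpos
    rw [gsop]
    by_cases hjN : j = N
    · subst hjN
      rw [if_pos rfl, PPfrom_stop T _ _ (le_refl _)]
      ring
    · rw [if_neg (by exact_mod_cast hjN)]
      simp only [PySem.List.pyGetD_natCast, if_neg hp]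
      have ht := hpos j (by omega) (by omega)
      have e1 : (↑j : ℤ) + 1 = ((j + 1 : ℕ) : ℤ) := by push_cast; ring
      rw [e1, ih p (j+1) (by omega) (by omega) hp (fun k hk1 hk2 => hpos k (by omega) hk2),
        ih (p * T.getD j 0) (j+1) (by omega) (by omega) (mul_ne_zero hp (by omega)) (fun k hk1 hk2 => hpos k (by omega) hk2),
        PPfrom_step T j N (by omega)]
      ring

lemma gsop_zero (T : List Int) (N : ℕ) :
    ∀ (fuel : ℕ) (j : ℕ), N - j ≤ fuel → j ≤ N →
    (∀ k, j ≤ k → k < N → 0 < T.getD k 0) →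
    gsop fuel T (↑N) 0 (↑j) = PPfrom T j N - 1 := by
  intro fuel
  induction fuel with
  | zero =>
    intro j hfuel hj hpos
    have hjN : j = N := by omega
    subst hjN
    rw [gsop, PPfrom_stop T _ _ (le_refl _)]
    ring
  | succ fuel ih =>
    intro j hfuel hj hpos
    rw [gsop]
    by_cases hjN : j = N
    · subst hjN
      rw [if_pos rfl, PPfrom_stop T _ _ (le_refl _)]
      ring
    · rw [if_neg (by exact_mod_cast hjN)]
      simp only [PySem.List.pyGetD_natCast, if_true]
      have ht := hpos j (by omega) (by omega)
      have e1 : (↑j : ℤ) + 1 = ((j + 1 : ℕ) : ℤ) := by push_cast; ring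
      rw [e1, ih (j+1) (by omega) (by omega) (fun k hk1 hk2 => hpos k (by omega) hk2),
        gsop_nonzero T N fuel (T.getD j 0) (j+1) (by omega) (by omega) (by omega) (fun k hk1 hk2 => hpos k (by omega) hk2),
        PPfrom_step T j N (by omega)]
      ring

lemma stripB_spec : ∀ (fuel : ℕ) (n m : ℕ), 1 ≤ n → 2 ≤ m → Nat.Prime m → n ≤ fuel →
    ∃ n' : ℕ, stripB fuel (↑n) (↑m) = (↑n' : ℤ) ∧ 1 ≤ n' ∧ n' ≤ n ∧ ¬ m ∣ n' ∧
      (∀ q, Nat.Prime q → q ∣ n' → q ∣ n) ∧ Dspec n' (m + 1) = Dspec n (m + 1) := by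
  intro fuel
  induction fuel with
  | zero => intro n m h1 hm hpm hfuel; omega
  | succ fuel ih =>
    intro n m h1 hm hpm hfuel
    rw [stripB]
    by_cases hdvd : m ∣ n
    · have hmod : n % m = 0 := Nat.dvd_iff_mod_eq_zero.mp hdvd
      rw [if_pos (by simp [PySem.Int.mod_natCast, hmod])]
      simp only [PySem.Int.floordiv_natCast]
      have hmn : m ≤ n := Nat.le_of_dvd (by omega) hdvd
      have hdiv1 : 1 ≤ n / m := (Nat.one_le_div_iff (by omega)).mpr hmn
      have hlt : n / m < n := Nat.div_lt_self (by omega) (by omega)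
      obtain ⟨n', he, hn1, hle, hnd, hdq, hD⟩ :=
        ih (n / m) m hdiv1 hm hpm (by omega)
      refine ⟨n', he, hn1, by omega, hnd, ?_, ?_⟩
      · intro q hq hqd
        exact (hdq q hq hqd).trans (Nat.div_dvd_of_dvd hdvd)
      · rw [hD, Dspec_div n m hpm hdvd (by omega)]
    · rw [if_neg]
      · exact ⟨n, rfl, h1, le_refl n, hdvd, fun q _ hq => hq, rfl⟩
      · simp only [PySem.Int.mod_natCast, Nat.cast_eq_zero]
        intro hmod
        exact hdvd (Nat.dvd_of_mod_eq_zero hmod)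

lemma loopB_spec : ∀ (fuel : ℕ) (n m : ℕ) (r : ℤ), 1 ≤ n → 2 ≤ m →
    (∀ q, Nat.Prime q → q ∣ n → m ≤ q) → n + 2 - m ≤ fuel →
    (if 1 < (loopB fuel (↑n) (↑m) r).1
      then (loopB fuel (↑n) (↑m) r).2 * (1 + (loopB fuel (↑n) (↑m) r).1)
      else (loopB fuel (↑n) (↑m) r).2) = r * Dspec n m := by
  intro fuel
  induction fuel with
  | zero =>
    intro n m r h1 hm hmin hfuel
    have hstep : loopB 0 (↑n) (↑m) r = ((↑n : ℤ), r) := rfl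
    rw [hstep]
    rcases Nat.lt_or_ge 1 n with hn2 | hn2
    · rw [if_pos (show (1:ℤ) < ((n:ℤ), r).1 by change (1:ℤ) < (n:ℤ); exact_mod_cast hn2),
        Dspec_prime_tail n m hn2 hmin (by have h := Nat.le_mul_of_pos_left m (show 0 < m by omega); omega)]
    · have hn1 : n = 1 := by omega
      subst hn1
      rw [if_neg (by norm_num), Dspec_one, mul_one]
  | succ fuel ih =>
    intro n m r h1 hm hmin hfuel
    by_cases hmm : m * m ≤ n
    · have hn2 : 2 ≤ n := by nlinarith
      have hmn : m ≤ n := by nlinarith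
      by_cases hdvd : m ∣ n
      · have hpm : Nat.Prime m := prime_of_min n m hm hdvd hn2 hmin
        obtain ⟨n', he, hn1, hle, hnd, hdq, hD⟩ :=
          stripB_spec n n m h1 hm hpm (le_refl n)
        have hstep : loopB (fuel + 1) (↑n) (↑m) r
            = loopB fuel (↑n') (↑(m + 1 : ℕ)) (r * (1 + (m:ℤ))) := by
          rw [loopB, if_pos (show (↑m : ℤ) * ↑m ≤ ↑n by exact_mod_cast hmm),
            if_pos (show PySem.Int.mod (↑n) (↑m) = 0 by
              simp [PySem.Int.mod_natCast, Nat.dvd_iff_mod_eq_zero.mp hdvd])]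
          rw [show ((n:ℤ)).toNat = n from Int.toNat_natCast n, he]
          norm_cast
        rw [hstep]
        rw [ih n' (m + 1) (r * (1 + (m:ℤ))) hn1 (by omega) ?minh (by omega)]
        case minh =>
          intro q hq hqd
          have := hmin q hq (hdq q hq hqd)
          rcases Nat.lt_or_ge q (m + 1) with h' | h'
          · have : q = m := by omega
            subst this
            exact absurd hqd hnd
          · exact h'
        rw [Dspec_split n m hpm hdvd (by omega), hD]
        ring
      · have hstep : loopB (fuel + 1) (↑n) (↑m) r = loopB fuel (↑n) (↑(m + 1 : ℕ)) r := by
          rw [loopB, if_pos (show (↑m : ℤ) * ↑m ≤ ↑n by exact_mod_cast hmm), if_neg]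
          · norm_cast
          · simp only [PySem.Int.mod_natCast, Nat.cast_eq_zero]
            intro hmod
            exact hdvd (Nat.dvd_of_mod_eq_zero hmod)
        rw [hstep]
        rw [ih n (m + 1) r h1 (by omega) ?minh2 (by omega)]
        case minh2 =>
          intro q hq hqd
          have := hmin q hq hqd
          rcases Nat.lt_or_ge q (m + 1) with h' | h'
          · have : q = m := by omega
            subst this
            exact absurd hqd hdvd
          · exact h'
        rw [Dspec_succ_of_not n m (by tauto)]
    · have hstep : loopB (fuel + 1) (↑n) (↑m) r = ((↑n : ℤ), r) := by
        rw [loopB, if_neg (show ¬ ((↑m : ℤ) * ↑m ≤ ↑n) by exact_mod_cast hmm)]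
      rw [hstep]
      rcases Nat.lt_or_ge 1 n with hn2 | hn2
      · rw [if_pos (show (1:ℤ) < ((n:ℤ), r).1 by change (1:ℤ) < (n:ℤ); exact_mod_cast hn2),
          Dspec_prime_tail n m hn2 hmin (by omega)]
      · have hn1 : n = 1 := by omega
        subst hn1
        rw [if_neg (by norm_num), Dspec_one, mul_one]

lemma getD_set_self (T : List Int) (j : ℕ) (v : Int) (h : j < T.length) :
    (T.set j v).getD j 0 = v := by
  simp [List.getD_eq_getElem?_getD, h]

lemma getD_set_ne (T : List Int) (j k : ℕ) (v : Int) (h : k ≠ j) :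
    (T.set j v).getD k 0 = T.getD k 0 := by
  simp [List.getD_eq_getElem?_getD, Ne.symm h]

lemma getD_replicate_zero (k : ℕ) : (List.replicate 20 (0:ℤ)).getD k 0 = 0 := by
  simp only [List.getD_eq_getElem?_getD, List.getElem?_replicate]
  split <;> rfl

lemma postA_pair (T : List Int) (j : ℕ)
    (hpos : ∀ k, k < j → 0 < T.getD k 0)
    (hslot : T.getD j 0 = 0 ∨ 2 ≤ T.getD j 0) :
    postA (T, (↑j : ℤ)) =
      (if T.getD j 0 = 0 then PPfrom T 0 j else PPfrom T 0 j * (1 + T.getD j 0)) - 1 := by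
  unfold postA
  simp only [PySem.List.pyGetD_natCast]
  by_cases h0 : T.getD j 0 = 0
  · rw [if_neg (fun hh => hh h0), if_pos h0]
    have h := gsop_zero T j ((↑j : ℤ)).toNat 0 (by simp) (by omega)
      (fun k _ hk2 => hpos k hk2)
    simpa using h
  · have h2 : 2 ≤ T.getD j 0 := by tauto
    rw [if_pos h0, if_neg h0]
    have e1 : (↑j : ℤ) + 1 = ((j + 1 : ℕ) : ℤ) := by push_cast; ring
    rw [e1]
    have h := gsop_zero T (j + 1) (((j + 1 : ℕ) : ℤ)).toNat 0 (by simp) (by omega)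
      (fun k _ hk2 => by
        rcases Nat.lt_or_ge k j with h' | h'
        · exact hpos k h'
        · have : k = j := by omega
          subst this
          omega)
    rw [PPfrom_succ_right T 0 j (by omega)] at h
    simpa using h

lemma loopA_spec : ∀ (fuel : ℕ) (n m j : ℕ) (T : List Int),
    1 ≤ n → 2 ≤ m → T.length = 20 →
    (∀ q, Nat.Prime q → q ∣ n → m ≤ q) →
    (∀ k, k + 1 < j → T.getD k 0 < T.getD (k + 1) 0) →
    (∀ k, k < j → 2 ≤ T.getD k 0) →
    (∀ k, k < j → T.getD k 0 < (m : ℤ)) →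
    (T.getD j 0 = 0 ∨ T.getD j 0 = (m : ℤ)) →
    (∀ k, j < k → T.getD k 0 = 0) →
    QQfrom T 0 j * (if T.getD j 0 = 0 then 1 else (m : ℤ)) * (n : ℤ) ≤ 2 ^ 31 →
    n + (n + 2 - m) ≤ fuel →
    postA (loopA fuel (↑n) (↑m) (↑j) T) =
      PPfrom T 0 j * (if T.getD j 0 = 0 then Dspec n m else (1 + (m : ℤ)) * Dspec n (m + 1)) - 1 := by
  intro fuel
  induction fuel with
  | zero => intro n m j T h1 hm hT hmin hmono hge2 hltp hslot hzero hbound hfuel; omega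
  | succ fuel ih =>
    intro n m j T h1 hm hT hmin hmono hge2 hltp hslot hzero hbound hfuel
    have hQQ1 : 1 ≤ QQfrom T 0 j := by
      have h := QQfrom_ge_asc T j (entries_ge T j hmono hge2)
      have := asc_pos j
      omega
    by_cases hn1 : 1 < n
    case neg =>
      have hn : n = 1 := by omega
      subst hn
      have hstep : loopA (fuel + 1) (((1:ℕ)) : ℤ) (↑m) (↑j) T = (T, (↑j : ℤ)) := by
        rw [loopA, if_neg (by norm_num)]
      rw [hstep, postA_pair T j (fun k hk => by have := hge2 k hk; omega)
        (by rcases hslot with h0 | hm0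
            · exact Or.inl h0
            · right; rw [hm0]; exact_mod_cast hm)]
      rcases hslot with h0 | hm0
      · rw [if_pos h0, if_pos h0, Dspec_one, mul_one]
      · have hne : T.getD j 0 ≠ 0 := by rw [hm0]; exact_mod_cast (by omega : (m:ℕ) ≠ 0)
        rw [if_neg hne, if_neg hne, Dspec_one, hm0]
        ring
    case pos =>
      have h1n : (1 : ℤ) < (↑n : ℤ) := by exact_mod_cast hn1
      have hmn : m ≤ n := min_le_self n m (by omega) hmin
      by_cases hC : is_prime (↑m) = false ∨ PySem.Int.mod (↑n) (↑m) ≠ 0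
      · -- skip branch: p += 1, maybe bump i
        have hnd : ¬ (Nat.Prime m ∧ m ∣ n) := by
          rintro ⟨hp, hd⟩
          rcases hC with hf | hmod
          · rw [is_prime_complete m hp] at hf
            exact Bool.noConfusion hf
          · exact hmod (by simp [PySem.Int.mod_natCast, Nat.dvd_iff_mod_eq_zero.mp hd])
        have hmin' : ∀ q, Nat.Prime q → q ∣ n → m + 1 ≤ q := by
          intro q hq hqd
          have := hmin q hq hqd
          rcases Nat.lt_or_ge q (m + 1) with h' | h'
          · have : q = m := by omega
            subst this
            exact absurd ⟨hq, hqd⟩ hnd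
          · exact h'
        rcases hslot with h0 | hm0
        · -- slot empty: i stays
          have hstep : loopA (fuel + 1) (↑n) (↑m) (↑j) T
              = loopA fuel (↑n) (↑(m + 1 : ℕ)) (↑j) T := by
            rw [loopA, if_pos h1n, if_pos hC,
              if_neg (by simp only [PySem.List.pyGetD_natCast, ne_eq, not_not]; exact h0)]
            norm_cast
          rw [hstep]
          rw [ih n (m + 1) j T h1 (by omega) hT hmin' hmono hge2
            (fun k hk => by have := hltp k hk; push_cast; omega)
            (Or.inl h0) hzero
            (by rw [if_pos h0]; rw [if_pos h0] at hbound; exact hbound)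
            (by omega)]
          rw [if_pos h0, if_pos h0, Dspec_succ_of_not n m hnd]
        · -- slot holds m: bump i, then p += 1
          have hm0' : T.getD j 0 ≠ 0 := by
            rw [hm0]; exact_mod_cast (by omega : (m:ℕ) ≠ 0)
          have hstep : loopA (fuel + 1) (↑n) (↑m) (↑j) T
              = loopA fuel (↑n) (↑(m + 1 : ℕ)) (↑(j + 1 : ℕ)) T := by
            rw [loopA, if_pos h1n, if_pos hC,
              if_pos (by simpa [PySem.List.pyGetD_natCast] using hm0')]
            norm_cast
          rw [hstep]
          rw [ih n (m + 1) (j + 1) T h1 (by omega) hT hmin'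
            (by intro k hk
                rcases Nat.lt_or_ge (k + 1) j with h' | h'
                · exact hmono k h'
                · have hkj : j = k + 1 := by omega
                  subst hkj
                  rw [hm0]
                  exact hltp k (by omega))
            (by intro k hk
                rcases Nat.lt_or_ge k j with h' | h'
                · exact hge2 k h'
                · have : k = j := by omega
                  subst this
                  rw [hm0]; exact_mod_cast hm)
            (by intro k hk
                rcases Nat.lt_or_ge k j with h' | h'
                · have := hltp k h'; push_cast; omega
                · have : k = j := by omega
                  subst this
                  rw [hm0]; push_cast; omega)
            (Or.inl (hzero (j + 1) (by omega)))
            (fun k hk => hzero k (by omega))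
            (by rw [if_pos (hzero (j + 1) (by omega)), QQfrom_succ_right T 0 j (by omega), hm0]
                rw [if_neg hm0'] at hbound
                calc QQfrom T 0 j * (m:ℤ) * 1 * ↑n = QQfrom T 0 j * (m:ℤ) * ↑n := by ring
                _ ≤ 2 ^ 31 := hbound)
            (by omega)]
          rw [if_pos (hzero (j + 1) (by omega)), if_neg hm0',
            PPfrom_succ_right T 0 j (by omega), hm0]
          ring
      · -- divide branch: x //= p, T[i] = p
        have hmod0 : PySem.Int.mod (↑n) (↑m) = 0 := by tauto
        have hdvd : m ∣ n := by
          apply Nat.dvd_of_mod_eq_zero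
          have := hmod0
          rw [PySem.Int.mod_natCast] at this
          exact_mod_cast this
        have hpm : Nat.Prime m := prime_of_min n m hm hdvd (by omega) hmin
        have hQn : QQfrom T 0 j * (n : ℤ) ≤ 2 ^ 31 := by
          rcases hslot with h0 | hm0
          · rw [if_pos h0] at hbound
            calc QQfrom T 0 j * (n:ℤ) = QQfrom T 0 j * 1 * ↑n := by ring
            _ ≤ 2 ^ 31 := hbound
          · have hm0' : T.getD j 0 ≠ 0 := by
              rw [hm0]; exact_mod_cast (by omega : (m:ℕ) ≠ 0)
            rw [if_neg hm0'] at hbound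
            have hmz : (2:ℤ) ≤ (m:ℤ) := by exact_mod_cast hm
            nlinarith [hQQ1, (by exact_mod_cast Nat.zero_lt_of_lt hn1 : (0:ℤ) < (n:ℤ))]
        have hj12 : j < 12 := index_bound T j n (by omega) hmono hge2 hQn
        have hj20 : j < T.length := by omega
        have hmuldiv : (m : ℤ) * ((n / m : ℕ) : ℤ) = (n : ℤ) := by
          exact_mod_cast Nat.mul_div_cancel' hdvd
        have hdivlt : n / m < n := Nat.div_lt_self (by omega) (by omega)
        have hdiv1 : 1 ≤ n / m := (Nat.one_le_div_iff (by omega)).mpr hmn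
        have hstep : loopA (fuel + 1) (↑n) (↑m) (↑j) T
            = loopA fuel (↑(n / m : ℕ)) (↑m) (↑j) (T.set j (↑m)) := by
          rw [loopA, if_pos h1n, if_neg hC]
          simp [PySem.Int.floordiv_natCast, PySem.List.pySetD_natCast]
        rw [hstep]
        have hsetj : (T.set j (↑m : ℤ)).getD j 0 = (↑m : ℤ) := getD_set_self T j _ hj20
        have hsetne : (T.set j (↑m : ℤ)).getD j 0 ≠ 0 := by
          rw [hsetj]; exact_mod_cast (by omega : (m:ℕ) ≠ 0)
        have hQQc : QQfrom (T.set j (↑m : ℤ)) 0 j = QQfrom T 0 j :=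
          QQfrom_congr _ T 0 j (fun k _ hk2 => getD_set_ne T j k _ (by omega))
        have hPPc : PPfrom (T.set j (↑m : ℤ)) 0 j = PPfrom T 0 j :=
          PPfrom_congr _ T 0 j (fun k _ hk2 => getD_set_ne T j k _ (by omega))
        rw [ih (n / m) m j (T.set j (↑m)) hdiv1 hm (by simp [hT]) 
          (fun q hq hqd => hmin q hq (hqd.trans (Nat.div_dvd_of_dvd hdvd)))
          (fun k hk => by
            rw [getD_set_ne T j k _ (by omega), getD_set_ne T j (k+1) _ (by omega)]
            exact hmono k hk)
          (fun k hk => by rw [getD_set_ne T j k _ (by omega)]; exact hge2 k hk)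
          (fun k hk => by rw [getD_set_ne T j k _ (by omega)]; exact hltp k hk)
          (Or.inr hsetj)
          (fun k hk => by rw [getD_set_ne T j k _ (by omega)]; exact hzero k hk)
          (by rw [if_neg hsetne, hQQc]
              calc QQfrom T 0 j * (m:ℤ) * ((n/m : ℕ) : ℤ)
                  = QQfrom T 0 j * ((m:ℤ) * ((n/m : ℕ) : ℤ)) := by ring
              _ = QQfrom T 0 j * (n:ℤ) := by rw [hmuldiv]
              _ ≤ 2 ^ 31 := hQn)
          (by omega)]
        rw [if_neg hsetne, hPPc, Dspec_div n m hpm hdvd (by omega)]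
        rcases hslot with h0 | hm0
        · rw [if_pos h0, Dspec_split n m hpm hdvd (by omega)]
        · have hm0' : T.getD j 0 ≠ 0 := by
            rw [hm0]; exact_mod_cast (by omega : (m:ℕ) ≠ 0)
          rw [if_neg hm0']

-- ===== VERDICT (by name: the statement is the Claim_ definition above) =====
theorem f_spec : Claim_equal_f := by
  unfold Claim_equal_f
  intro x hdom
  unfold Spec_f
  unfold Dom_f pvDomInt at hdom
  rw [decide_eq_true_iff] at hdom
  by_cases hx : 1 < x
  · have hxn : x = ((x.toNat : ℕ) : ℤ) := by omega
    set n := x.toNat with hn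
    have hn2 : 2 ≤ n := by omega
    have hA : f x = Dspec n 2 - 1 := by
      have h := loopA_spec (2 * n + 2) n 2 0 (List.replicate 20 0) (by omega) (by omega)
        (by simp) (fun q hq _ => hq.two_le)
        (fun k hk => by omega) (fun k hk => by omega) (fun k hk => by omega)
        (Or.inl (getD_replicate_zero 0))
        (fun k _ => getD_replicate_zero k)
        (by rw [QQfrom_stop _ 0 0 (le_refl 0), if_pos (getD_replicate_zero 0)]
            have : (n : ℤ) ≤ 2 ^ 31 := by omega
            linarith)
        (by omega)
      rw [PPfrom_stop _ 0 0 (le_refl 0), if_pos (getD_replicate_zero 0)] at h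
      show postA (loopA (2 * x.toNat + 2) x 2 0 (List.replicate 20 0)) = Dspec n 2 - 1
      rw [hxn]
      simpa using h
    have hB : f_alt x = Dspec n 2 - 1 := by
      have h := loopB_spec (n + 2) n 2 1 (by omega) (le_refl 2)
        (fun q hq _ => hq.two_le) (by omega)
      show (if 1 < (loopB (x.toNat + 2) x 2 1).1
          then (loopB (x.toNat + 2) x 2 1).2 * (1 + (loopB (x.toNat + 2) x 2 1).1)
          else (loopB (x.toNat + 2) x 2 1).2) - 1 = Dspec n 2 - 1
      rw [hxn]
      have h2 : ((2:ℕ) : ℤ) = (2 : ℤ) := by norm_num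
      rw [← h2]
      rw [show ((n:ℤ)).toNat = n from Int.toNat_natCast n]
      rw [h]
      ring
    rw [hA, hB]
  · have hA : f x = 0 := by
      show postA (loopA (2 * x.toNat + 2) x 2 0 (List.replicate 20 0)) = 0
      rw [show 2 * x.toNat + 2 = (2 * x.toNat + 1) + 1 from rfl, loopA, if_neg hx]
      unfold postA
      rw [if_neg (by simp [PySem.List.pyGetD_zero])]
      rfl
    have hB : f_alt x = 0 := by
      show (if 1 < (loopB (x.toNat + 2) x 2 1).1
          then (loopB (x.toNat + 2) x 2 1).2 * (1 + (loopB (x.toNat + 2) x 2 1).1)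
          else (loopB (x.toNat + 2) x 2 1).2) - 1 = 0
      rw [show x.toNat + 2 = (x.toNat + 1) + 1 from rfl, loopB,
        if_neg (show ¬ ((2:ℤ) * 2 ≤ x) by omega)]
      rw [if_neg (show ¬ ((1:ℤ) < ((x, (1:ℤ)).1)) by exact hx)]
      ring
    rw [hA, hB]
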